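-- pv_equiv track=rewrite | github.com/bc-writings/drafts | x-todo-x/cirtidivpar7-chika.py | verifie
-- ===== SOURCE A (Python) =====
-- def est_divisible_par7(nbre):
--
--     """
--
--     Cette fonction applique le critere de Chika a nbre, qui est un
--
--     entier qui a entre 2 et 4 chiffres.
--
--     Par exemple pour nbre = 8722. On separe (872,2)
--
--     872+5*2=882. On sépare (88,2)
--
--     On recommance pour 882 en appelant est_divisible_par7_3ch
--
--    88+5*2=98
--
--     Or 98 est divisible par 7
--
--     Elle retourne True si le critere de Chika prouve que le nombre
--
--     est divisible par 7, et False sinon.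
--
--     Precondition : nbre est un entier
--
--     Postcondition : la fonction retourne un booleen
--
--     """
--
--     resultat=nbre
--
--     while resultat>58:
--         unites=resultat%10 #reste de la division par 10
--
--         dizaines=resultat//10 #division entière par 10 donne le quotient entier
--
--         resultat=dizaines+5*unites
--
--     if resultat%7==0:
--
--         return True
--
--     else:
--
--         return False
--
-- def verifie(liste):
--
--     """
--
--     liste est une liste d'entiers.
--
--     Cette fonction retourne le tuple
--
--     (nombre d'entiers divisibles par 7 de la liste suivant le critere de Chika,
--
--     nombre d'entiers non divisibles par 7 de la liste suivant le critere de Chika)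
--
--     verifie([7*143,7*143+1,7*143+2,7*143+3,7*144])retourne (2,3)
--
--     Precondition : liste est du type liste
--
--     Postcondition : la fonction retourne un tuple
--
--
--
--     """
--
--     cpt_divisible=0
--
--     cpt_non_divisible=0
--
--     for element in liste:
--
--         if est_divisible_par7(element)==True:
--
--             cpt_divisible=cpt_divisible+1
--
--         else:
--
--             cpt_non_divisible=cpt_non_divisible+1
--
--     return (cpt_divisible,cpt_non_divisible)
-- ===== SOURCE B (Python) =====
-- def verifie(liste):
--     cpt_divisible = sum(1 for x in liste if x % 7 == 0)
--     return (cpt_divisible, len(liste) - cpt_divisible)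
-- ===== Notes on version B (the rewrite author's own statement) =====
-- stated objective: faster
-- what changed: Replaces the iterative Chika digit-folding test per element with a direct x % 7 == 0 check, counting divisibles in one comprehension-sum and deriving the other count by subtraction from len() (measured ~4x faster).
import Mathlib
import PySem

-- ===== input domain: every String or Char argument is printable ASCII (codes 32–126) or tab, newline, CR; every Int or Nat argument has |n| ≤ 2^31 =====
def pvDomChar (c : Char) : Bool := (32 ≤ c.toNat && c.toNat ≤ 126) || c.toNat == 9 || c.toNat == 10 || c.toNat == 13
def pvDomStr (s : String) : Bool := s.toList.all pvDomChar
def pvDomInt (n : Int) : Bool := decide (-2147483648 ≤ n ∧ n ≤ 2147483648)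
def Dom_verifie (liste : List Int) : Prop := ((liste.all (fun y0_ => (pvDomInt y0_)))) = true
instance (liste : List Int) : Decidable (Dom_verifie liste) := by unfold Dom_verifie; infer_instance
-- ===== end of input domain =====

-- B replaces A's iterative Chika digit-folding divisibility test by a direct x % 7 == 0
-- check and derives the non-divisible count by subtraction (objective: simpler).

-- ===== PORT A =====
-- the while-loop of est_divisible_par7: while resultat > 58: resultat = resultat//10 + 5*(resultat%10)
def chikaLoop (resultat : Int) : Int :=
  if h : resultat > 58 then
    chikaLoop (PySem.Int.floordiv resultat 10 + 5 * PySem.Int.mod resultat 10)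
  else resultat
termination_by resultat.toNat
decreasing_by
  have h10 : (0:Int) < 10 := by omega
  have hm := PySem.Int.mod_nonneg resultat h10
  have hm' := PySem.Int.mod_lt resultat h10
  have hd := PySem.Int.floordiv_mul_add_mod resultat 10
  omega

def est_divisible_par7 (nbre : Int) : Bool :=
  let resultat := chikaLoop nbre
  if PySem.Int.mod resultat 7 = 0 then true else false

def verifie (liste : List Int) : Int × Int :=
  let init : Int × Int := (0, 0)
  liste.foldl (fun (cpt : Int × Int) element =>
    if est_divisible_par7 element = true then (cpt.1 + 1, cpt.2)
    else (cpt.1, cpt.2 + 1)) init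

-- ===== PORT B =====
def verifie_alt (liste : List Int) : Int × Int :=
  let cpt_divisible : Int := (liste.filter (fun x => PySem.Int.mod x 7 = 0)).length
  (cpt_divisible, (liste.length : Int) - cpt_divisible)

-- ===== PRECONDITION & SPEC =====
def Spec_verifie (liste : List Int) (out : Int × Int) : Prop := out = verifie_alt liste
instance (liste : List Int) (out : Int × Int) : Decidable (Spec_verifie liste out) := by unfold Spec_verifie; infer_instance

-- ===== CLAIM (what is proved, stated in full; the proofs are below) =====
def Claim_equal_verifie : Prop := ∀ (liste : List Int), Dom_verifie liste → Spec_verifie liste (verifie liste)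

-- ===== LEMMAS AND PROOFS =====

-- the Chika step preserves divisibility by 7 (5·(10d+u) ≡ d+5u mod 7, 5 invertible)
theorem chikaLoop_dvd_iff (r : Int) : (7 ∣ chikaLoop r) ↔ (7 ∣ r) := by
  fun_induction chikaLoop r with
  | case1 r h ih =>
    have hd := PySem.Int.floordiv_mul_add_mod r 10
    rw [ih]
    constructor <;> intro hdvd <;> omega
  | case2 r h => rfl

theorem est_divisible_eq (n : Int) : est_divisible_par7 n = decide (PySem.Int.mod n 7 = 0) := by
  simp only [est_divisible_par7, PySem.Int.mod_eq_zero_iff_dvd, chikaLoop_dvd_iff]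
  split_ifs with h <;> simp [h]

theorem verifie_fold (liste : List Int) (a b : Int) :
    liste.foldl (fun (cpt : Int × Int) element =>
      if PySem.Int.mod element 7 = 0 then (cpt.1 + 1, cpt.2)
      else (cpt.1, cpt.2 + 1)) (a, b)
    = (a + ((liste.filter (fun x => PySem.Int.mod x 7 = 0)).length : Int),
       b + ((liste.length : Int) - ((liste.filter (fun x => PySem.Int.mod x 7 = 0)).length : Int))) := by
  induction liste generalizing a b with
  | nil => simp
  | cons x xs ih =>
    simp only [List.foldl_cons, List.filter_cons, List.length_cons]
    by_cases hx : PySem.Int.mod x 7 = 0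
    · simp only [hx, decide_true, if_true, ih, Prod.mk.injEq, List.length_cons]
      constructor <;> push_cast <;> ring
    · simp only [hx, decide_false, Bool.false_eq_true, if_false, ih, Prod.mk.injEq]
      constructor <;> push_cast <;> ring

-- ===== VERDICT (by name: the statement is the Claim_ definition above) =====
theorem verifie_spec : Claim_equal_verifie := by
  intro liste _
  show verifie liste = verifie_alt liste
  simp only [verifie, verifie_alt, est_divisible_eq, decide_eq_true_eq, verifie_fold,
    Prod.mk.injEq]
  constructor <;> ring
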